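/- GENERATED by mk_final_copies.py from the proof of the farm's unit `start_decoder.C11d` (farm:start_decoder.C11d.1: Proof.lean) as the
   re-elaboration sweep compiled it — do not edit. -/
import Asan.CheckWalk
import Vorbis.Spec.Reader
import Vorbis.Spec.StartDecoderC4
import Vorbis.Spec.Units.start_decoder_C11d
import Vorbis.Spec.Worked.start_decoder_C11d_Lemmas

open X86 X86.User Asan Vorbis Vorbis.Spec Vorbis.Spec.StartDecoder

set_option maxRecDepth 4000
set_option maxHeartbeats 4000000

namespace Vorbis.Spec.start_decoder_C11d

/-- **Segment C11d of `start_decoder`** (`cut159` 0x114d1a, the return of `lookup1_values(c->entries, c->dimensions)`,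
stb_vorbis_fixed.c:3883–3885): `ebx = values`; FIX 17: `values < 0` (`js`) or `entries < values` (signed `jl` after the checked
load of `c->entries`, check 0x114d24) → the stub 0x114d41 `error(f, 20)`, `jmp 0x113b22`: `AtERR` (`err_exit11d`); otherwise the
checked store `c->lookup_values = values` (check 0x114d33) and the `jmp` to the join 0x114c6f: `At11V` (`join_exit11d`, with
`values ≤ entries` from the two branch conditions, `fix17_le`). The walk leaves nine goals, in program order. -/
theorem segC11d_walk {Lay : Layout} (hLay : Lay.hi = 0x1000000) {μ : Microarch} (hμ : UserX.MicroOK μ) {u₀ : State}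
    (hcode : HasCodeNat Lay u₀ Vorbis.L.start_decoder.entry Vorbis.Code.code_start_decoder.nat Vorbis.L.start_decoder.size)
    (hst4 : Asan.SmallCheck Lay μ Vorbis.WayInv (Vorbis.CodeOK u₀) [.rax, .rcx, .rdx] 4 Vorbis.L.__asan_store4_noabort.entry)
    (hld4 : Asan.SmallCheck Lay μ Vorbis.WayInv (Vorbis.CodeOK u₀) [.rax, .rcx, .rdx] 4 Vorbis.L.__asan_load4_noabort.entry)
    (herr : ∀ (others : List Obj) (frames : List (Nat × FrameLayout)), Calls Lay μ Vorbis.WayInv (Vorbis.conv u₀) Vorbis.L.error.entry (Vorbis.Spec.error.spec others frames))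
    {g : Ghost} {i : Nat} {A2 A3 Ai : Arena} {A : Arena × List Obj} {v : State}
    (hat : In11P u₀ g i A2 A3 Ai A Vorbis.L.start_decoder.cut159 v)
    (hvb : 1 ≤ Codebook.value_bits v.mem (g.cb v.mem i) ∧ Codebook.value_bits v.mem (g.cb v.mem i) ≤ 16)
    (hlt1 : Codebook.lookup_type v.mem (g.cb v.mem i) = 1) :
    ReachVia Lay μ WayInv v (fun w => At11V u₀ g i w ∨ AtERR u₀ g w) := by
  have hfr := hat.frame
  have he := hfr.entry
  v_entry he
  simp only [depth] at he_room he_stack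
  have w_rip := hfr.rip
  obtain ⟨hr1, hr2⟩ := hfr.r_eq
  simp only [steady] at hr1
  have hRA : g.RA = (g.e.reg .rsp).toNat := rfl
  have c_rsp : v.reg .rsp = g.e.reg .rsp - 1480 := by
    rw [hfr.rsp]
    refine (eq_addr _ _ ?_).symm
    unfold Ghost.R Ghost.RA steady
    u_omega
  -- the struct `c = cb(i)`: inside the codebooks block, a setup block of the arena
  have ha := hat.cur.sd.arena
  have hcb := hat.cur.ages.cbOK
  have hBA : A.1.Blk (codebooksBlock v.mem g.f) := hcb.F2.mono hat.cur.ages.exti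
  have hcin := hcb.cb_in i hat.cur.lt
  have hboff := ha.block_off hBA
  have hbin := arena_inside ha hBA
  have hbnd := ha.bounds
  simp only [vblock, Off.sizeof.Codebook] at hcin hboff hbin
  have hcdef : stb_vorbis.codebooks_at v.mem g.f i = g.cb v.mem i := rfl
  rw [hcdef] at hcin
  have c_r14n : (v.reg .r14).toNat = g.cb v.mem i := by
    rw [hat.cur.r14]
    exact toNat_addr _ (by omega)
  have hBA' : A.1.Block (stb_vorbis.codebooks v.mem g.f) (2120 * (stb_vorbis.codebook_count v.mem g.f).toNat) := hBA
  have e28 : v.reg .r14 + 28 = addr (g.cb v.mem i + 28) := by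
    rw [hat.cur.r14]
    exact Vorbis.addr_add_lit _ 28
  have e4 : v.reg .r14 + 4 = addr (g.cb v.mem i + 4) := by
    rw [hat.cur.r14]
    exact Vorbis.addr_add_lit _ 4
  have t28 : (v.reg .r14 + 28).toNat = g.cb v.mem i + 28 := by
    rw [e28]
    exact toNat_addr _ (by omega)
  have t4 : (v.reg .r14 + 4).toNat = g.cb v.mem i + 4 := by
    rw [e4]
    exact toNat_addr _ (by omega)
  have hE : v.mem.readLE (v.reg .r14 + 4) 4 = (v.mem.u32 (g.cb v.mem i + 4)) := by
    rw [e4]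
    simp only [Mem.u32]
  have hout := hat.cur.hand.objOut
  simp only [voff] at hout
  have hobr := hat.cur.sd.bits.OBR
  simp only [voff] at hobr
  have t1 : (g.e.reg .rsp - 1488).toNat = (g.e.reg .rsp).toNat - 1488 := by u_omega
  have sl_f : v.mem.readLE (g.e.reg .rsp - 1456) 8 = g.f := by
    have e : addr (g.R + 0x18) = g.e.reg .rsp - 1456 := by
      refine (eq_addr _ _ ?_).symm
      unfold Ghost.R Ghost.RA steady
      u_omega
    rw [← e]
    exact hat.cur.slot_f
  have hst := C4.obj_stack hfr hat.cur.hand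
  have htx := hat.cur.hand.arenaText
  simp only [Vorbis.L.textHi] at htx
  have w_eq : Mem.EqOn Vorbis.L.textLo Vorbis.L.textHi u₀.mem v.mem := hfr.code
  have hdf : v.flags .df = false := (show abiInv _ from hfr.inv).1
  have hmx : v.mxcsr &&& 0x1F80 = 0x1F80 := (show abiInv _ from hfr.inv).2
  have hsse := Vorbis.sseOK_of_abiInv hfr.inv
  have herr' := herr A.2 g.frames'
  obtain ⟨z, c_rax⟩ : ∃ z, v.reg .rax = z := ⟨_, rfl⟩
  u_walk hcode [hμ.vendor] until [Vorbis.L.start_decoder.cut4, Vorbis.L.start_decoder.at_114c6f] span [Vorbis.L.textLo, Vorbis.L.textHi] side (v_side)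
  · -- 1. `js` taken (`values < 0`): the call of `error(f, 20)`
    v_inv
  · -- its precondition
    have hun : ShadowUntouched v.mem s_114d4e.mem := by v_untouched
    have hf : (s_114d4e.reg .rdi).toNat = g.f := by
      rw [w_rdi]
      exact toNat_addr g.f (by omega)
    have hrs : (s_114d4e.reg .rsp).toNat + 8 = g.R := by
      rw [w_rsp, t1]
      omega
    refine ⟨⟨?_, hfr.offText⟩, ?_⟩
    · rw [hrs]
      exact hfr.shadow.untouched hun
    · rw [hf]
      exact hat.cur.hand.obj.mono (C4.sub_frames g A)
  · -- 2. check 0x114d24: the load of `c->entries` (`c + 4`), inside the codebooks block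
    have hun : ShadowUntouched v.mem s_114d24.mem := by v_untouched
    have hsh' := hfr.shadow.untouched hun
    refine ⟨hsh'.sealed, ?_⟩
    rw [t4]
    exact ha.block_acc_inv hsh' hBA' (by omega) (by omega) (by decide)
  · -- 3. `jl` taken (`entries < values`): the call of `error(f, 20)`
    v_inv
  · -- its precondition
    have hun : ShadowUntouched v.mem s_114d4e.mem := by v_untouched
    have hf : (s_114d4e.reg .rdi).toNat = g.f := by
      rw [w_rdi]
      exact toNat_addr g.f (by omega)
    have hrs : (s_114d4e.reg .rsp).toNat + 8 = g.R := by
      rw [w_rsp, t1]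
      omega
    refine ⟨⟨?_, hfr.offText⟩, ?_⟩
    · rw [hrs]
      exact hfr.shadow.untouched hun
    · rw [hf]
      exact hat.cur.hand.obj.mono (C4.sub_frames g A)
  · -- 4. check 0x114d33: the store of `c->lookup_values` (`c + 28`), inside the codebooks block
    have hun : ShadowUntouched v.mem s_114d33.mem := by v_untouched
    have hsh' := hfr.shadow.untouched hun
    refine ⟨hsh'.sealed, ?_⟩
    rw [t28]
    exact ha.block_acc_inv hsh' hBA' (by omega) (by omega) (by decide)
  · -- 5. the return of `error` on the `js` path: `jmp 0x113b22`, `AtERR`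
    v_after_call w_rsp_114d4e w_mem_114d4e
    have hf : (s_114d4e.reg .rdi).toNat = g.f := by
      rw [w_rdi_114d4e]
      exact toNat_addr g.f (by omega)
    simp only [hf, t1] at w_same
    have hp : s_114d4er.reg .rax = 0 ∧ ShadowUntouched s_114d4e.mem s_114d4er.mem ∧
        s_114d4er.mem.readLE (s_114d4e.reg .rdi + 140) 4 = (s_114d4e.reg .rsi).toNat % 2 ^ 32 := w_post
    have w_rax := hp.1
    have hun0 : ShadowUntouched v.mem s_114d4e.mem := by v_untouched
    have hunAll : ShadowUntouched v.mem s_114d4er.mem := Mem.EqOn.trans hun0 hp.2.1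
    u_walk hcode [hμ.vendor] until [Vorbis.L.start_decoder.cut4, Vorbis.L.start_decoder.at_114c6f] span [Vorbis.L.textLo, Vorbis.L.textHi] side (v_side)
    have hall : Mem.SameExcept [⟨g.R - 408, g.R⟩, ⟨g.f + 140, g.f + 144⟩] v.mem s_114d53.mem := by
      rw [w_mem]
      exact err_glue11d hr1 he_room t1 w_same
    have hun1 : ShadowUntouched v.mem s_114d53.mem := by
      rw [w_mem]
      exact hunAll
    have habi : abiInv s_114d53 := by
      refine Vorbis.abiInv_of ?_ ?_
      · rw [w_flags]
        exact w_df
      · rw [w_mxcsr]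
        exact w_mx
    have hrsp : s_114d53.reg .rsp = v.reg .rsp := by
      rw [w_rsp, c_rsp]
    exact ReachVia.done (Or.inr (err_exit11d hat hall hun1 (err_wins11d g _) w_rip hrsp w_eq habi (w_kept .r14 rfl) w_rax))
  · -- 6. the return of `error` on the `jl` path: `jmp 0x113b22`, `AtERR`
    v_after_call w_rsp_114d4e w_mem_114d4e
    have hf : (s_114d4e.reg .rdi).toNat = g.f := by
      rw [w_rdi_114d4e]
      exact toNat_addr g.f (by omega)
    simp only [hf, t1] at w_same
    have hp : s_114d4er.reg .rax = 0 ∧ ShadowUntouched s_114d4e.mem s_114d4er.mem ∧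
        s_114d4er.mem.readLE (s_114d4e.reg .rdi + 140) 4 = (s_114d4e.reg .rsi).toNat % 2 ^ 32 := w_post
    have w_rax := hp.1
    have hun0 : ShadowUntouched v.mem s_114d4e.mem := by v_untouched
    have hunAll : ShadowUntouched v.mem s_114d4er.mem := Mem.EqOn.trans hun0 hp.2.1
    u_walk hcode [hμ.vendor] until [Vorbis.L.start_decoder.cut4, Vorbis.L.start_decoder.at_114c6f] span [Vorbis.L.textLo, Vorbis.L.textHi] side (v_side)
    have hall : Mem.SameExcept [⟨g.R - 408, g.R⟩, ⟨g.f + 140, g.f + 144⟩] v.mem s_114d53.mem := by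
      rw [w_mem]
      exact err_glue11d hr1 he_room t1 w_same
    have hun1 : ShadowUntouched v.mem s_114d53.mem := by
      rw [w_mem]
      exact hunAll
    have habi : abiInv s_114d53 := by
      refine Vorbis.abiInv_of ?_ ?_
      · rw [w_flags]
        exact w_df
      · rw [w_mxcsr]
        exact w_mx
    have hrsp : s_114d53.reg .rsp = v.reg .rsp := by
      rw [w_rsp, c_rsp]
    exact ReachVia.done (Or.inr (err_exit11d hat hall hun1 (err_wins11d g _) w_rip hrsp w_eq habi (w_kept .r14 rfl) w_rax))
  · -- 7. FIX 17 passed: `c->lookup_values = values` is stored; the join 0x114c6f, `At11V`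
    rw [e28] at w_mem
    have hcn : (addr (g.cb v.mem i + 28)).toNat = g.cb v.mem i + 28 := toNat_addr _ (by omega)
    have hsame : Mem.SameExcept [⟨g.R - 408, g.R⟩, ⟨g.cb v.mem i + 28, g.cb v.mem i + 32⟩] v.mem s_114d3c.mem := by
      rw [w_mem]
      refine Mem.SameExcept.step_writeLE _ 4 _ (Mem.SameExcept.writeLE _ v.mem _ 8 _ ?_ ?_) ?_ ?_
      · rw [t1]
        omega
      · refine ⟨⟨g.R - 408, g.R⟩, List.mem_cons_self, ?_, ?_⟩
        · rw [t1]
          show g.R - 408 ≤ _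
          omega
        · rw [t1]
          show _ ≤ g.R
          omega
      · rw [hcn]
        omega
      · refine ⟨⟨g.cb v.mem i + 28, g.cb v.mem i + 32⟩, List.mem_cons_of_mem _ List.mem_cons_self, ?_, ?_⟩
        · rw [hcn]
          exact Nat.le_refl _
        · rw [hcn]
          exact Nat.le_refl _
    have hun : ShadowUntouched v.mem s_114d3c.mem := by v_untouched
    have habi : abiInv s_114d3c := by
      refine Vorbis.abiInv_of ?_ ?_
      · rw [w_flags]
        exact w_df_114d33
      · rw [w_mxcsr]
        exact hmx
    have hrsp : s_114d3c.reg .rsp = v.reg .rsp := by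
      rw [w_rsp, c_rsp]
    -- the stored value, read back: `lookup_values = values ≤ entries` (signed compare, sign bit clear)
    have hlv : (Codebook.lookup_values s_114d3c.mem (g.cb v.mem i) : Int) ≤ Codebook.entries v.mem (g.cb v.mem i) := by
      have e1 : Codebook.lookup_values s_114d3c.mem (g.cb v.mem i) = (Word.part .w32 z).toNat % 2 ^ 32 := by
        simp only [vacc, voff]
        rw [w_mem]
        exact Mem.u32_writeLE_same _ _ _
      have e2 : Codebook.entries v.mem (g.cb v.mem i) = (BitVec.ofNat 32 (v.mem.u32 (g.cb v.mem i + 4))).toInt := by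
        simp only [vacc, voff]
        exact (Mem.toInt_ofNat32_u32 _ _).symm
      rw [e1, e2]
      exact fix17_le _ _ hbr_114d1e hbr_114d2d
    exact ReachVia.done (Or.inl (join_exit11d hat hvb hlt1 hsame hun (store_wins11d g _) w_rip hrsp w_eq habi
      (w_kept .r14 rfl) hlv))

end Vorbis.Spec.start_decoder_C11d

/-- The unit `start_decoder.C11d`: `segC11d_walk` at every entry state. -/
theorem Vorbis.Spec.Worked.start_decoder_C11d_ok : Vorbis.Spec.start_decoder_C11d.Statement := by
  intro Lay hLay μ hμ u₀ hcode hst4 hld4 herr g i v hat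
  obtain ⟨A, A2, A3, Ai, h, hvb, hlt1⟩ := hat
  exact Vorbis.Spec.start_decoder_C11d.segC11d_walk hLay hμ hcode hst4 hld4 herr h hvb hlt1
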